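-- pv_equiv track=rewrite | github.com/Cautioncrazy/Pokemon-RogueExtract | tools/pbs_generator/generate_pokemon_index.py | build_evolution_graph
-- ===== SOURCE A (Python) =====
-- from collections import defaultdict, deque
--
-- def parse_csv_field(value):
--     if not value:
--         return []
--     return [x.strip() for x in value.split(",") if x.strip()]
--
-- def normalize_species_key(species_id):
--     return species_id.strip()
--
-- def parse_evolutions(evo_str):
--     """
--     Essentials commonly uses:
--     Evolutions=SPECIES,Method,Parameter,SPECIES2,Method2,Parameter2,...
--     We only care about target species IDs at every 3-step interval.
--     """
--     tokens = parse_csv_field(evo_str)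
--     results = []
--
--     i = 0
--     while i < len(tokens):
--         target = tokens[i].strip()
--         method = tokens[i + 1].strip() if i + 1 < len(tokens) else None
--         param = tokens[i + 2].strip() if i + 2 < len(tokens) else None
--
--         if target:
--             results.append({
--                 "target": target,
--                 "method": method,
--                 "parameter": param
--             })
--         i += 3
--
--     return results
--
-- def build_evolution_graph(entries_map):
--     forward = defaultdict(list)  # species -> [targets]
--     reverse = defaultdict(list)  # species -> [pre-evos]
--
--     for species_id, data in entries_map.items():
--         evos = parse_evolutions(data.get("Evolutions", ""))
--         for evo in evos:
--             target = normalize_species_key(evo["target"])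
--             if target in entries_map:
--                 forward[species_id].append(target)
--                 reverse[target].append(species_id)
--
--     return forward, reverse
-- ===== SOURCE B (Python) =====
-- from collections import defaultdict
--
-- def build_evolution_graph(entries_map):
--     # Pass 1: one flat list of the valid evolution edges (source, target), in scan order.
--     edges = []
--     for species_id, data in entries_map.items():
--         tokens = [x.strip() for x in data.get("Evolutions", "").split(",")]
--         tokens = [x for x in tokens if x]
--         edges += [(species_id, t) for t in tokens[0::3] if t in entries_map]
--     # Pass 2: gather each adjacency list whole, per distinct key in first-seen order.
--     forward = defaultdict(list)
--     forward.update((s, [t for src, t in edges if src == s])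
--                    for s in dict.fromkeys(src for src, _ in edges))
--     reverse = defaultdict(list)
--     reverse.update((t, [s for s, tgt in edges if tgt == t])
--                    for t in dict.fromkeys(tgt for _, tgt in edges))
--     return forward, reverse
-- ===== Notes on version B (the rewrite author's own statement) =====
-- stated objective: alternative
-- what changed: B replaces A's single interleaved scatter loop (per-entry record parser appending into both defaultdicts edge by edge) with an edge-list pipeline: it first collects one flat list of valid (source,target) edges, then builds each of forward and reverse by GATHERING every adjacency list whole — for each distinct key in first-seen order, a filter scan of the edge list — instead of scattering appends.
import Mathlib
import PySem

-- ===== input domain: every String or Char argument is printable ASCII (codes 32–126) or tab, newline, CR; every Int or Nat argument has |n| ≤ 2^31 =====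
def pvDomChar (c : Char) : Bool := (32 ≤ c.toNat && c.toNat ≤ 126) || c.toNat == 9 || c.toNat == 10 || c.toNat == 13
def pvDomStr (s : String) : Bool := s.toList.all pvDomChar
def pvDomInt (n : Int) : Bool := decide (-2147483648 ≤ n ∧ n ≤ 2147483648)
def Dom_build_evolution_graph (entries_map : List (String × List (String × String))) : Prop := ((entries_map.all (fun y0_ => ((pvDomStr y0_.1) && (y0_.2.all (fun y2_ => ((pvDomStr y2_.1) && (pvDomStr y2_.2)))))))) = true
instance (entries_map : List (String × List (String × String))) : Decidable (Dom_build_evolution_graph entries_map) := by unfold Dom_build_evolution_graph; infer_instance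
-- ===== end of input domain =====

-- B replaces A's interleaved scatter loop by an edge-list pipeline: collect all valid
-- (source, target) edges once, then GATHER each adjacency list whole per distinct key
-- (objective: alternative, same results).

-- ===== PORT A =====

-- shared module helpers (used verbatim by A)
def parse_csv_field (value : String) : List String :=
  if value = "" then []
  else ((PySem.Str.split? value ",").getD []).map PySem.Str.strip |>.filter (fun x => x ≠ "")
  -- split? is some here since the separator "," is nonempty

def normalize_species_key (species_id : String) : String := PySem.Str.strip species_id

-- 'while i < len(tokens): … i += 3' as structural recursion on the token list in chunks of 3
def parse_evolutions_loop : List String → List (String × Option String × Option String)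
  | [] => []
  | t :: rest =>
    let target := PySem.Str.strip t
    let method := rest[0]?.map PySem.Str.strip
    let param := rest[1]?.map PySem.Str.strip
    let tail := parse_evolutions_loop (rest.drop 2)
    if target ≠ "" then (target, method, param) :: tail else tail
  termination_by l => l.length
  decreasing_by simp [List.length_drop]

def parse_evolutions (evo_str : String) : List (String × Option String × Option String) :=
  parse_evolutions_loop (parse_csv_field evo_str)

-- defaultdict(list): d[k].append(v) on an insertion-ordered association list
def pvAppend (d : List (String × List String)) (k v : String) : List (String × List String) :=
  match d with
  | [] => [(k, [v])]
  | (k', vs) :: rest => if k' = k then (k', vs ++ [v]) :: rest else (k', vs) :: pvAppend rest k v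

def build_evolution_graph (entries_map : List (String × List (String × String))) : (List (String × List String)) × (List (String × List String)) :=
  let m := PySem.Dict.ofList entries_map       -- the dict A receives
  m.items.foldl (fun st p =>
    let evos := parse_evolutions ((PySem.Dict.ofList p.2).getD "Evolutions" "")
    evos.foldl (fun st e =>
      let target := normalize_species_key e.1
      if m.contains target then (pvAppend st.1 p.1 target, pvAppend st.2 target p.1) else st)
      st) ([], [])

-- ===== PORT B =====

-- tokens[0::3]: hand port of the stride-3 slice from 0 (exact: indices 0,3,6,…)
def everyThird : List String → List String
  | [] => []
  | t :: rest => t :: everyThird (rest.drop 2)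
  termination_by l => l.length
  decreasing_by simp [List.length_drop]

def build_evolution_graph_alt (entries_map : List (String × List (String × String))) : (List (String × List String)) × (List (String × List String)) :=
  let m := PySem.Dict.ofList entries_map       -- the dict B receives
  -- Pass 1: the flat edge list, 'edges += [(species_id, t) for t in tokens[0::3] if t in entries_map]'
  let edges : List (String × String) := m.items.foldl (fun es p =>
    let tokens := (((PySem.Str.split? ((PySem.Dict.ofList p.2).getD "Evolutions" "") ",").getD []).map PySem.Str.strip).filter (fun x => x ≠ "")
    es ++ ((everyThird tokens).filter (fun t => m.contains t)).map (fun t => (p.1, t))) []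
  -- Pass 2: gather per distinct key (dict.fromkeys order) by a filter scan of the edge list
  let forward := (PySem.List.dedup (edges.map Prod.fst)).map
    (fun s => (s, (edges.filter (fun e => e.1 == s)).map Prod.snd))
  let reverse := (PySem.List.dedup (edges.map Prod.snd)).map
    (fun t => (t, (edges.filter (fun e => e.2 == t)).map Prod.fst))
  (forward, reverse)

-- ===== PRECONDITION & SPEC =====
def Spec_build_evolution_graph (entries_map : List (String × List (String × String))) (out : (List (String × List String)) × (List (String × List String))) : Prop := out = build_evolution_graph_alt entries_map
instance (entries_map : List (String × List (String × String))) (out : (List (String × List String)) × (List (String × List String))) : Decidable (Spec_build_evolution_graph entries_map out) := by unfold Spec_build_evolution_graph; infer_instance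

-- ===== CLAIM (what is proved, stated in full; the proofs are below) =====
def Claim_equal_build_evolution_graph : Prop := ∀ (entries_map : List (String × List (String × String))), Dom_build_evolution_graph entries_map → Spec_build_evolution_graph entries_map (build_evolution_graph entries_map)

-- ===== LEMMAS AND PROOFS =====

-- proof-only abbreviations
def tgOf (m : PySem.Dict String (List (String × String))) (d : List (String × String)) : List String :=
  (everyThird (parse_csv_field ((PySem.Dict.ofList d).getD "Evolutions" ""))).filter (fun t => m.contains t)

def edgesOf (m : PySem.Dict String (List (String × String))) (p : String × List (String × String)) : List (String × String) :=
  (tgOf m p.2).map (fun t => (p.1, t))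

def stepF (m : PySem.Dict String (List (String × String))) (f : List (String × List String)) (p : String × List (String × String)) : List (String × List String) :=
  (tgOf m p.2).foldl (fun f t => pvAppend f p.1 t) f

def stepR (m : PySem.Dict String (List (String × String))) (r : List (String × List String)) (p : String × List (String × String)) : List (String × List String) :=
  (tgOf m p.2).foldl (fun r t => pvAppend r t p.1) r

def gatherBy (k v : String × String → String) (es : List (String × String)) : List (String × List String) :=
  (PySem.List.dedup (es.map k)).map (fun x => (x, (es.filter (fun e => k e == x)).map v))

-- strip is idempotent
lemma dropWhile_dropWhile (p : Char → Bool) (l : List Char) :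
    List.dropWhile p (List.dropWhile p l) = List.dropWhile p l := by
  induction l with
  | nil => simp
  | cons a l ih =>
    by_cases h : p a
    · simpa [h] using ih
    · simp [h]

lemma dropWhile_prefix_fix (p : Char → Bool) (pre t : List Char)
    (hpre : pre <+: t) (ht : List.dropWhile p t = t) :
    List.dropWhile p pre = pre := by
  cases pre with
  | nil => simp
  | cons a pre' =>
    obtain ⟨u, hu⟩ := hpre
    subst hu
    simp only [List.cons_append] at ht
    by_cases h : p a
    · exfalso
      rw [List.dropWhile_cons, if_pos h] at ht
      have h1 := List.length_dropWhile_le p (pre' ++ u)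
      rw [ht] at h1
      simp only [List.length_cons, List.length_append] at h1
      omega
    · simp [h]

lemma chars_rstrip_idem (x : List Char) :
    PySem.Chars.rstrip (PySem.Chars.rstrip x) = PySem.Chars.rstrip x := by
  simp [PySem.Chars.rstrip, dropWhile_dropWhile]

lemma chars_strip_idem (l : List Char) :
    PySem.Chars.strip (PySem.Chars.strip l) = PySem.Chars.strip l := by
  unfold PySem.Chars.strip
  have ht : List.dropWhile PySem.Chars.isspace (PySem.Chars.lstrip l) = PySem.Chars.lstrip l :=
    dropWhile_dropWhile _ l
  have hpre : PySem.Chars.rstrip (PySem.Chars.lstrip l) <+: PySem.Chars.lstrip l := by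
    unfold PySem.Chars.rstrip
    have h := List.dropWhile_suffix (l := (PySem.Chars.lstrip l).reverse) (p := PySem.Chars.isspace)
    simpa using h.reverse
  have hfix : PySem.Chars.lstrip (PySem.Chars.rstrip (PySem.Chars.lstrip l))
       = PySem.Chars.rstrip (PySem.Chars.lstrip l) :=
    dropWhile_prefix_fix _ _ _ hpre ht
  rw [hfix, chars_rstrip_idem]

lemma str_strip_idem (s : String) : PySem.Str.strip (PySem.Str.strip s) = PySem.Str.strip s := by
  simp [PySem.Str.strip, chars_strip_idem]

lemma tokens_prop (v : String) : ∀ t ∈ parse_csv_field v, PySem.Str.strip t = t ∧ t ≠ "" := by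
  intro t ht
  unfold parse_csv_field at ht
  split at ht
  · simp at ht
  · rw [List.mem_filter] at ht
    obtain ⟨hmem, hne⟩ := ht
    rw [List.mem_map] at hmem
    obtain ⟨y, _, rfl⟩ := hmem
    exact ⟨str_strip_idem y, by simpa using hne⟩

-- B's token expression equals the module helper parse_csv_field (A's early [] return on "" is
-- exactly what strip-then-filter produces on "".split(","))
lemma tokens_eq (v : String) :
    (((PySem.Str.split? v ",").getD []).map PySem.Str.strip).filter (fun x => x ≠ "")
      = parse_csv_field v := by
  by_cases h : v = ""
  · subst h; decide
  · simp [parse_csv_field, h]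

-- pvAppend facts
lemma pvAppend_absent (d : List (String × List String)) (k v : String)
    (h : k ∉ d.map Prod.fst) : pvAppend d k v = d ++ [(k, [v])] := by
  induction d with
  | nil => rfl
  | cons q rest ih =>
    obtain ⟨k', vs⟩ := q
    simp only [List.map_cons, List.mem_cons, not_or] at h
    have hne : ¬ (k' = k) := fun he => h.1 he.symm
    rw [pvAppend, if_neg hne]
    simp [ih h.2]

lemma pvAppend_mapform (ks : List String) (g : String → List String) (t s : String)
    (hnd : ks.Nodup) (ht : t ∈ ks) :
    pvAppend (ks.map (fun x => (x, g x))) t s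
      = ks.map (fun x => (x, if x = t then g x ++ [s] else g x)) := by
  induction ks with
  | nil => cases ht
  | cons a ks ih =>
    rw [List.nodup_cons] at hnd
    by_cases ha : a = t
    · subst ha
      simp only [List.map_cons, pvAppend, if_true]
      congr 1
      apply List.map_congr_left
      intro x hx
      have hne : x ≠ a := fun he => hnd.1 (he ▸ hx)
      simp [hne]
    · have ht' : t ∈ ks := by
        cases ht with
        | head => exact absurd rfl ha
        | tail _ h => exact h
      simp only [List.map_cons, pvAppend]
      rw [if_neg ha, if_neg ha, ih hnd.2 ht']

lemma filter_nil_of_not_mem (es : List (String × String)) (k : String × String → String)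
    (t : String) (h : t ∉ es.map k) : es.filter (fun e => k e == t) = [] := by
  rw [List.filter_eq_nil_iff]
  intro e he
  simp only [beq_iff_eq]
  intro hk
  exact h (hk ▸ List.mem_map_of_mem he)

lemma dedup_append_singleton (l : List String) (x : String) :
    PySem.List.dedup (l ++ [x])
      = if x ∈ l then PySem.List.dedup l else PySem.List.dedup l ++ [x] := by
  have h : PySem.List.dedup (l ++ [x]) = PySem.Set.add (PySem.List.dedup l) x := by
    simp only [PySem.List.dedup_eq_ofList, PySem.Set.ofList_eq_foldl, List.foldl_append,
      List.foldl_cons, List.foldl_nil]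
  rw [h]
  by_cases hx : x ∈ l
  · rw [if_pos hx]
    exact PySem.Set.add_of_mem (by simpa [PySem.List.dedup_eq_ofList, PySem.Set.mem_ofList] using hx)
  · rw [if_neg hx]
    exact PySem.Set.add_of_not_mem (by simpa [PySem.List.dedup_eq_ofList, PySem.Set.mem_ofList] using hx)

-- scatter (fold of keyed appends) = gather (per distinct key, a filter scan)
lemma scatter_gather (k v : String × String → String) (es : List (String × String)) :
    es.foldl (fun d e => pvAppend d (k e) (v e)) [] = gatherBy k v es := by
  induction es using List.reverseRecOn with
  | nil => rfl
  | append_singleton es e ih =>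
    rw [List.foldl_append, List.foldl_cons, List.foldl_nil, ih]
    unfold gatherBy
    rw [List.map_append, List.map_cons, List.map_nil, dedup_append_singleton]
    by_cases h : k e ∈ es.map k
    · rw [if_pos h]
      rw [pvAppend_mapform _ _ _ _ (by simp [PySem.List.dedup_eq_ofList, PySem.Set.nodup_ofList])
        (by simpa [PySem.List.mem_dedup] using h)]
      apply List.map_congr_left
      intro x hx
      rw [List.filter_append, List.map_append]
      by_cases hx' : x = k e
      · subst hx'
        simp
      · have hne : ¬ ((k e == x) = true) := by
          simp only [beq_iff_eq]
          exact fun he => hx' he.symm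
        simp [hx', hne]
    · rw [if_neg h, List.map_append, List.map_cons, List.map_nil]
      rw [pvAppend_absent _ _ _ (by
        simp only [List.map_map]
        intro hin
        rw [List.mem_map] at hin
        obtain ⟨x, hx, hxe⟩ := hin
        simp only [Function.comp] at hxe
        exact h (by simpa [PySem.List.mem_dedup, ← hxe] using hx))]
      congr 1
      · apply List.map_congr_left
        intro x hx
        have hxm : x ∈ es.map k := by simpa [PySem.List.mem_dedup] using hx
        have hne : ¬ ((k e == x) = true) := by
          simp only [beq_iff_eq]
          exact fun he => h (he ▸ hxm)
        simp [List.filter_append, hne]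
      · have h0 : es.filter (fun e' => k e' == k e) = [] := filter_nil_of_not_mem es k _ h
        simp [List.filter_append, h0]

-- a fold over an append-accumulated list is the nested fold
lemma foldl_nested {α β γ : Type} (l : List α) (h : α → List β)
    (g : γ → β → γ) (es0 : List β) (d0 : γ) :
    (l.foldl (fun es p => es ++ h p) es0).foldl g d0
      = l.foldl (fun d p => (h p).foldl g d) (es0.foldl g d0) := by
  induction l generalizing es0 with
  | nil => rfl
  | cons p l ih =>
    rw [List.foldl_cons, List.foldl_cons, ih, List.foldl_append]

lemma stepF_as_edges (m : PySem.Dict String (List (String × String)))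
    (f : List (String × List String)) (p : String × List (String × String)) :
    stepF m f p = (edgesOf m p).foldl (fun f e => pvAppend f e.1 e.2) f := by
  simp [stepF, edgesOf, List.foldl_map]

lemma stepR_as_edges (m : PySem.Dict String (List (String × String)))
    (r : List (String × List String)) (p : String × List (String × String)) :
    stepR m r p = (edgesOf m p).foldl (fun r e => pvAppend r e.2 e.1) r := by
  simp [stepR, edgesOf, List.foldl_map]

-- A's inner loop over the evolution records is the split per-component folds over tgOf
lemma innerA_loop (m : PySem.Dict String (List (String × String))) (s : String) :
    ∀ (n : Nat) (tks : List String), tks.length ≤ n →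
      (∀ t ∈ tks, PySem.Str.strip t = t ∧ t ≠ "") →
      ∀ (st : (List (String × List String)) × (List (String × List String))),
      (parse_evolutions_loop tks).foldl (fun st e =>
          let target := normalize_species_key e.1
          if m.contains target then (pvAppend st.1 s target, pvAppend st.2 target s) else st) st
      = (((everyThird tks).filter (fun t => m.contains t)).foldl (fun f t => pvAppend f s t) st.1,
         ((everyThird tks).filter (fun t => m.contains t)).foldl (fun r t => pvAppend r t s) st.2) := by
  intro n
  induction n with
  | zero =>
    intro tks hlen _ st
    have : tks = [] := List.eq_nil_of_length_eq_zero (Nat.le_zero.mp hlen)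
    subst this
    simp [parse_evolutions_loop, everyThird]
  | succ n ih =>
    intro tks hlen h st
    cases tks with
    | nil => simp [parse_evolutions_loop, everyThird]
    | cons t rest =>
      obtain ⟨hstrip, hne⟩ := h t (by simp)
      have hrest : ∀ x ∈ rest.drop 2, PySem.Str.strip x = x ∧ x ≠ "" :=
        fun x hx => h x (List.mem_cons_of_mem _ (List.mem_of_mem_drop hx))
      have hlen' : (rest.drop 2).length ≤ n := by
        simp only [List.length_cons] at hlen
        simp only [List.length_drop]
        omega
      rw [parse_evolutions_loop, everyThird]
      by_cases hc : m.contains t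
      · simp only [hstrip, ne_eq, hne, not_false_eq_true, if_pos, List.foldl_cons,
          normalize_species_key, List.filter_cons, hc]
        exact ih (rest.drop 2) hlen' hrest (pvAppend st.1 s t, pvAppend st.2 t s)
      · simp only [hstrip, ne_eq, hne, not_false_eq_true, if_pos, List.foldl_cons,
          normalize_species_key, List.filter_cons, hc]
        exact ih (rest.drop 2) hlen' hrest st

lemma innerA_eq (m : PySem.Dict String (List (String × String)))
    (st : (List (String × List String)) × (List (String × List String)))
    (p : String × List (String × String)) :
    (parse_evolutions ((PySem.Dict.ofList p.2).getD "Evolutions" "")).foldl (fun st e =>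
        let target := normalize_species_key e.1
        if m.contains target then (pvAppend st.1 p.1 target, pvAppend st.2 target p.1) else st) st
      = (stepF m st.1 p, stepR m st.2 p) := by
  rw [parse_evolutions]
  exact innerA_loop m p.1 _ _ le_rfl (tokens_prop _) st

lemma A_eq (entries_map : List (String × List (String × String))) :
    build_evolution_graph entries_map =
      ((PySem.Dict.ofList entries_map).items.foldl (stepF (PySem.Dict.ofList entries_map)) [],
       (PySem.Dict.ofList entries_map).items.foldl (stepR (PySem.Dict.ofList entries_map)) []) := by
  have expand : build_evolution_graph entries_map =
      (PySem.Dict.ofList entries_map).items.foldl (fun st p =>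
        (parse_evolutions ((PySem.Dict.ofList p.2).getD "Evolutions" "")).foldl (fun st e =>
          let target := normalize_species_key e.1
          if (PySem.Dict.ofList entries_map).contains target then
            (pvAppend st.1 p.1 target, pvAppend st.2 target p.1) else st) st) ([], []) := rfl
  rw [expand]
  have hfun : (fun (st : (List (String × List String)) × (List (String × List String)))
        (p : String × List (String × String)) =>
        (parse_evolutions ((PySem.Dict.ofList p.2).getD "Evolutions" "")).foldl (fun st e =>
          let target := normalize_species_key e.1
          if (PySem.Dict.ofList entries_map).contains target then
            (pvAppend st.1 p.1 target, pvAppend st.2 target p.1) else st) st)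
      = (fun st p => (stepF (PySem.Dict.ofList entries_map) st.1 p,
                      stepR (PySem.Dict.ofList entries_map) st.2 p)) := by
    funext st p
    exact innerA_eq (PySem.Dict.ofList entries_map) st p
  rw [hfun]
  exact PySem.List.foldl_prod_mk (f := stepF (PySem.Dict.ofList entries_map))
    (g := stepR (PySem.Dict.ofList entries_map)) _ _ _

lemma B_eq (entries_map : List (String × List (String × String))) :
    build_evolution_graph_alt entries_map =
      (gatherBy Prod.fst Prod.snd
        ((PySem.Dict.ofList entries_map).items.foldl
          (fun es p => es ++ edgesOf (PySem.Dict.ofList entries_map) p) []),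
       gatherBy Prod.snd Prod.fst
        ((PySem.Dict.ofList entries_map).items.foldl
          (fun es p => es ++ edgesOf (PySem.Dict.ofList entries_map) p) [])) := by
  unfold build_evolution_graph_alt gatherBy edgesOf tgOf
  simp only [tokens_eq]

-- ===== VERDICT (by name: the statement is the Claim_ definition above) =====
theorem build_evolution_graph_spec : Claim_equal_build_evolution_graph := by
  intro entries_map _
  unfold Spec_build_evolution_graph
  rw [A_eq, B_eq]
  have hF := foldl_nested (PySem.Dict.ofList entries_map).items
    (edgesOf (PySem.Dict.ofList entries_map)) (fun f e => pvAppend f e.1 e.2) [] []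
  have hR := foldl_nested (PySem.Dict.ofList entries_map).items
    (edgesOf (PySem.Dict.ofList entries_map)) (fun r e => pvAppend r e.2 e.1) [] []
  simp only [List.foldl_nil] at hF hR
  congr 1
  · rw [← scatter_gather Prod.fst Prod.snd, hF]
    have hstep : stepF (PySem.Dict.ofList entries_map)
        = fun d p => (edgesOf (PySem.Dict.ofList entries_map) p).foldl
            (fun f e => pvAppend f e.1 e.2) d := by
      funext f p
      exact stepF_as_edges _ f p
    rw [hstep]
  · rw [← scatter_gather Prod.snd Prod.fst, hR]
    have hstep : stepR (PySem.Dict.ofList entries_map)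
        = fun d p => (edgesOf (PySem.Dict.ofList entries_map) p).foldl
            (fun r e => pvAppend r e.2 e.1) d := by
      funext r p
      exact stepR_as_edges _ r p
    rw [hstep]
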